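-- pv_equiv track=rewrite | github.com/Andrem19/ALGO_RICHARC | helpers/statistic_count.py | additional_statistics
-- ===== SOURCE A (Python) =====
-- def additional_statistics(positions: list):
--     max_plus_in_row = 0
--     max_minus_in_row = 0
--     plus_in_row = 0
--     minus_in_row = 0
--
--     for position in positions:
--         if position['profit'] > 0:
--             plus_in_row += 1
--             minus_in_row = 0
--             if plus_in_row > max_plus_in_row:
--                 max_plus_in_row = plus_in_row
--         elif position['profit'] < 0:
--             minus_in_row += 1
--             plus_in_row = 0
--             if minus_in_row > max_minus_in_row:
--                 max_minus_in_row = minus_in_row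
--
--     result = {
--         'max_plus_in_row': max_plus_in_row,
--         'max_minus_in_row': max_minus_in_row
--     }
--     return result
-- ===== SOURCE B (Python) =====
-- def additional_statistics(positions: list):
--     # phase 1: reduce each position to a sign token, dropping zero-profit ones
--     signs = [1 if p['profit'] > 0 else -1
--              for p in positions if p['profit'] > 0 or p['profit'] < 0]
--     # phase 2: run-length encode the consecutive equal signs
--     runs = []
--     i = 0
--     n = len(signs)
--     while i < n:
--         j = i
--         while j < n and signs[j] == signs[i]:
--             j += 1
--         runs.append((signs[i], j - i))
--         i = j
--     # phase 3: pick the longest run of each sign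
--     max_plus = 0
--     max_minus = 0
--     for k, ln in runs:
--         if k == 1 and ln > max_plus:
--             max_plus = ln
--         elif k == -1 and ln > max_minus:
--             max_minus = ln
--     return {'max_plus_in_row': max_plus, 'max_minus_in_row': max_minus}
-- ===== Notes on version B (the rewrite author's own statement) =====
-- stated objective: alternative
-- what changed: Replaces A's single stateful scan (four mutable counters with resets) by a three-phase pipeline: map positions to sign tokens dropping zeros, run-length encode consecutive equal signs, then take the longest run per sign.
import Mathlib
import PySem

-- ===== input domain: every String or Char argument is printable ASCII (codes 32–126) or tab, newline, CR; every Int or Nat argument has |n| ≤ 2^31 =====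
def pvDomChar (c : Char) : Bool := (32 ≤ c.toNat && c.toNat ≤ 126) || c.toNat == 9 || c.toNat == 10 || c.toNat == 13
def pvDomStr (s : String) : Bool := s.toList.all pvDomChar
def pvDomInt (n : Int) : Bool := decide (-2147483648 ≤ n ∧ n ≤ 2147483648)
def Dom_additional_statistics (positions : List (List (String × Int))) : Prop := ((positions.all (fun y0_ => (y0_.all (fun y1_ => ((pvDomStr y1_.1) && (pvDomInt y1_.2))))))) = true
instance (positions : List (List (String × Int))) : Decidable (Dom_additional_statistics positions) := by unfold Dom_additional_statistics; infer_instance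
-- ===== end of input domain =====

-- B rewrites A's single stateful scan as a map/run-length-encode/max pipeline (objective: alternative, same cost).

-- ===== PORT A =====
-- position['profit'] : first-match association-list lookup; Pre_ guarantees the key is present
def pvProfitA (position : List (String × Int)) : Int :=
  ((position.find? (fun kv => kv.1 == "profit")).map Prod.snd).getD 0

-- loop body of A, folded over positions with state (max_plus_in_row, max_minus_in_row, plus_in_row, minus_in_row)
def pvStepA (s : Int × Int × Int × Int) (position : List (String × Int)) : Int × Int × Int × Int :=
  let profit := pvProfitA position
  if profit > 0 then
    (if s.2.2.1 + 1 > s.1 then s.2.2.1 + 1 else s.1, s.2.1, s.2.2.1 + 1, 0)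
  else if profit < 0 then
    (s.1, if s.2.2.2 + 1 > s.2.1 then s.2.2.2 + 1 else s.2.1, 0, s.2.2.2 + 1)
  else s

def additional_statistics (positions : List (List (String × Int))) : List (String × Int) :=
  let st := positions.foldl pvStepA (0, 0, 0, 0)
  [("max_plus_in_row", st.1), ("max_minus_in_row", st.2.1)]

-- ===== PORT B =====
-- the sign comprehension of Source B (filter + map in one pass)
def pvSign? (position : List (String × Int)) : Option Int :=
  let pr := ((position.find? (fun kv => kv.1 == "profit")).map Prod.snd).getD 0
  if pr > 0 ∨ pr < 0 then some (if pr > 0 then 1 else -1) else none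

-- Source B's index-based run-length encoding, as structural recursion on the sign list
def pvRuns : List Int → List (Int × Int)
  | [] => []
  | s :: rest =>
    (s, 1 + ((rest.takeWhile (fun x => x == s)).length : Int)) ::
      pvRuns (rest.dropWhile (fun x => x == s))
  termination_by l => l.length
  decreasing_by simpa using Nat.lt_succ_of_le (List.length_dropWhile_le _ _)

-- Source B's final for-loop over the runs
def pvStepB (b : Int × Int) (kn : Int × Int) : Int × Int :=
  if kn.1 == 1 && decide (kn.2 > b.1) then (kn.2, b.2)
  else if kn.1 == -1 && decide (kn.2 > b.2) then (b.1, kn.2)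
  else b

def additional_statistics_alt (positions : List (List (String × Int))) : List (String × Int) :=
  let signs := positions.filterMap pvSign?
  let best := (pvRuns signs).foldl pvStepB (0, 0)
  [("max_plus_in_row", best.1), ("max_minus_in_row", best.2)]

-- ===== PRECONDITION & SPEC =====
-- Pre_ excludes exactly the positions dicts missing the 'profit' key, on which Python A raises KeyError.
def Pre_additional_statistics (positions : List (List (String × Int))) : Prop :=
  (positions.all (fun p => p.any (fun kv => kv.1 == "profit"))) = true
instance (positions : List (List (String × Int))) : Decidable (Pre_additional_statistics positions) := by unfold Pre_additional_statistics; infer_instance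
def pvWitness_additional_statistics : (List (List (String × Int))) :=
  [[("profit", 3)], [("profit", -2)], [("profit", 0)], [("profit", -1)]]

def Spec_additional_statistics (positions : List (List (String × Int))) (out : List (String × Int)) : Prop := out = additional_statistics_alt positions
instance (positions : List (List (String × Int))) (out : List (String × Int)) : Decidable (Spec_additional_statistics positions out) := by unfold Spec_additional_statistics; infer_instance

-- ===== CLAIM (what is proved, stated in full; the proofs are below) =====
def Claim_equal_additional_statistics : Prop := ∀ (positions : List (List (String × Int))), Dom_additional_statistics positions → Pre_additional_statistics positions → Spec_additional_statistics positions (additional_statistics positions)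

-- ===== LEMMAS AND PROOFS =====

-- longest run of +1s in the sign list, extended by a pending run length p (abstracts A's plus_in_row bookkeeping)
def pvBestP (p : Int) : List Int → Int
  | [] => 0
  | s :: t => if s = 1 then max (p + 1) (pvBestP (p + 1) t) else pvBestP 0 t

def pvBestM (m : Int) : List Int → Int
  | [] => 0
  | s :: t => if s = -1 then max (m + 1) (pvBestM (m + 1) t) else pvBestM 0 t

theorem pvBestP_cons_one (p : Int) (t : List Int) :
    pvBestP p (1 :: t) = max (p + 1) (pvBestP (p + 1) t) := by
  rw [pvBestP]; norm_num

theorem pvBestP_cons_neg (p : Int) (t : List Int) :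
    pvBestP p (-1 :: t) = pvBestP 0 t := by
  rw [pvBestP]; norm_num

theorem pvBestM_cons_neg (m : Int) (t : List Int) :
    pvBestM m (-1 :: t) = max (m + 1) (pvBestM (m + 1) t) := by
  rw [pvBestM]; norm_num

theorem pvBestM_cons_one (m : Int) (t : List Int) :
    pvBestM m (1 :: t) = pvBestM 0 t := by
  rw [pvBestM]; norm_num

theorem pvSign?_eq (pos : List (String × Int)) :
    pvSign? pos = (if pvProfitA pos > 0 then some 1
      else if pvProfitA pos < 0 then some (-1) else none) := by
  unfold pvSign? pvProfitA
  split_ifs <;> simp_all <;> omega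

theorem pvStepA_pos (s : Int × Int × Int × Int) (pos : List (String × Int))
    (h : pvProfitA pos > 0) :
    pvStepA s pos = (if s.2.2.1 + 1 > s.1 then s.2.2.1 + 1 else s.1, s.2.1, s.2.2.1 + 1, 0) := by
  unfold pvStepA; rw [if_pos h]

theorem pvStepA_neg (s : Int × Int × Int × Int) (pos : List (String × Int))
    (h : pvProfitA pos < 0) :
    pvStepA s pos = (s.1, if s.2.2.2 + 1 > s.2.1 then s.2.2.2 + 1 else s.2.1, 0, s.2.2.2 + 1) := by
  unfold pvStepA; rw [if_neg (by omega), if_pos h]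

theorem pvStepA_zero (s : Int × Int × Int × Int) (pos : List (String × Int))
    (h : pvProfitA pos = 0) :
    pvStepA s pos = s := by
  unfold pvStepA; rw [if_neg (by omega), if_neg (by omega)]

theorem pvSign_pm (positions : List (List (String × Int))) :
    ∀ x ∈ positions.filterMap pvSign?, x = 1 ∨ x = -1 := by
  intro x hx
  rcases List.mem_filterMap.1 hx with ⟨p, _, hp⟩
  rw [pvSign?_eq] at hp
  split_ifs at hp <;> simp_all

theorem pvLemA1 (positions : List (List (String × Int))) :
    ∀ P M p m : Int, 0 ≤ P → 0 ≤ p →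
      (positions.foldl pvStepA (P, M, p, m)).1
        = max P (pvBestP p (positions.filterMap pvSign?)) := by
  induction positions with
  | nil => intro P M p m hP hp; simp [pvBestP]; omega
  | cons pos rest ih =>
    intro P M p m hP hp
    rcases lt_trichotomy (pvProfitA pos) 0 with h | h | h
    · rw [List.foldl_cons, pvStepA_neg _ _ h,
        List.filterMap_cons_some (f := pvSign?) (by rw [pvSign?_eq, if_neg (by omega), if_pos h])]
      rw [ih _ _ _ _ hP le_rfl]
      rw [pvBestP_cons_neg]
    · rw [List.foldl_cons, pvStepA_zero _ _ h,
        List.filterMap_cons_none (by rw [pvSign?_eq, if_neg (by omega), if_neg (by omega)])]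
      exact ih _ _ _ _ hP hp
    · rw [List.foldl_cons, pvStepA_pos _ _ h,
        List.filterMap_cons_some (f := pvSign?) (by rw [pvSign?_eq, if_pos h])]
      rw [ih _ _ _ _ (by simp only; split_ifs <;> omega) (by simp only; omega)]
      rw [pvBestP_cons_one]
      simp only
      generalize pvBestP (p + 1) (rest.filterMap pvSign?) = X
      split_ifs <;> omega

theorem pvLemA2 (positions : List (List (String × Int))) :
    ∀ P M p m : Int, 0 ≤ M → 0 ≤ m →
      (positions.foldl pvStepA (P, M, p, m)).2.1
        = max M (pvBestM m (positions.filterMap pvSign?)) := by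
  induction positions with
  | nil => intro P M p m hM hm; simp [pvBestM]; omega
  | cons pos rest ih =>
    intro P M p m hM hm
    rcases lt_trichotomy (pvProfitA pos) 0 with h | h | h
    · rw [List.foldl_cons, pvStepA_neg _ _ h,
        List.filterMap_cons_some (f := pvSign?) (by rw [pvSign?_eq, if_neg (by omega), if_pos h])]
      rw [ih _ _ _ _ (by simp only; split_ifs <;> omega) (by simp only; omega)]
      rw [pvBestM_cons_neg]
      simp only
      generalize pvBestM (m + 1) (rest.filterMap pvSign?) = X
      split_ifs <;> omega
    · rw [List.foldl_cons, pvStepA_zero _ _ h,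
        List.filterMap_cons_none (by rw [pvSign?_eq, if_neg (by omega), if_neg (by omega)])]
      exact ih _ _ _ _ hM hm
    · rw [List.foldl_cons, pvStepA_pos _ _ h,
        List.filterMap_cons_some (f := pvSign?) (by rw [pvSign?_eq, if_pos h])]
      rw [ih _ _ _ _ hM le_rfl]
      rw [pvBestM_cons_one]

-- pvBestP across a nonempty run of 1s
theorem pvBestP_run_one (w : List Int) (hw : ∀ x ∈ w, x = (1:Int)) :
    ∀ p t, pvBestP p ((1 :: w) ++ t) = max (p + 1 + w.length) (pvBestP (p + 1 + w.length) t) := by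
  induction w with
  | nil => intro p t; simp [pvBestP_cons_one]
  | cons a w' ih =>
    intro p t
    have ha : a = 1 := hw a (by simp)
    subst ha
    have h' : ∀ x ∈ w', x = (1:Int) := fun x hx => hw x (by simp [hx])
    rw [List.cons_append, pvBestP_cons_one]
    have := ih h' (p + 1) t
    rw [this]
    simp only [List.length_cons]
    push_cast
    have e : p + 1 + 1 + (w'.length : Int) = p + 1 + ((w'.length : Int) + 1) := by omega
    rw [e]
    generalize pvBestP (p + 1 + ((w'.length : Int) + 1)) t = X
    omega

theorem pvBestM_run_one (w : List Int) (hw : ∀ x ∈ w, x = (1:Int)) :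
    ∀ m t, pvBestM m ((1 :: w) ++ t) = pvBestM 0 t := by
  induction w with
  | nil => intro m t; simp [pvBestM_cons_one]
  | cons a w' ih =>
    intro m t
    have ha : a = 1 := hw a (by simp)
    subst ha
    have h' : ∀ x ∈ w', x = (1:Int) := fun x hx => hw x (by simp [hx])
    rw [List.cons_append, pvBestM_cons_one]
    exact ih h' 0 t

theorem pvBestM_run_neg (w : List Int) (hw : ∀ x ∈ w, x = (-1:Int)) :
    ∀ m t, pvBestM m ((-1 :: w) ++ t) = max (m + 1 + w.length) (pvBestM (m + 1 + w.length) t) := by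
  induction w with
  | nil => intro m t; simp [pvBestM_cons_neg]
  | cons a w' ih =>
    intro m t
    have ha : a = -1 := hw a (by simp)
    subst ha
    have h' : ∀ x ∈ w', x = (-1:Int) := fun x hx => hw x (by simp [hx])
    rw [List.cons_append, pvBestM_cons_neg]
    have := ih h' (m + 1) t
    rw [this]
    simp only [List.length_cons]
    push_cast
    have e : m + 1 + 1 + (w'.length : Int) = m + 1 + ((w'.length : Int) + 1) := by omega
    rw [e]
    generalize pvBestM (m + 1 + ((w'.length : Int) + 1)) t = X
    omega

theorem pvBestP_run_neg (w : List Int) (hw : ∀ x ∈ w, x = (-1:Int)) :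
    ∀ p t, pvBestP p ((-1 :: w) ++ t) = pvBestP 0 t := by
  induction w with
  | nil => intro p t; simp [pvBestP_cons_neg]
  | cons a w' ih =>
    intro p t
    have ha : a = -1 := hw a (by simp)
    subst ha
    have h' : ∀ x ∈ w', x = (-1:Int) := fun x hx => hw x (by simp [hx])
    rw [List.cons_append, pvBestP_cons_neg]
    exact ih h' 0 t

-- a pending run is irrelevant when the tail does not continue it
theorem pvBestP_reset (t : List Int) (ht : t = [] ∨ ∃ t', t = -1 :: t') (q : Int) :
    pvBestP q t = pvBestP 0 t := by
  rcases ht with h | ⟨t', h⟩ <;> subst h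
  · rfl
  · rw [pvBestP_cons_neg, pvBestP_cons_neg]

theorem pvBestM_reset (t : List Int) (ht : t = [] ∨ ∃ t', t = 1 :: t') (q : Int) :
    pvBestM q t = pvBestM 0 t := by
  rcases ht with h | ⟨t', h⟩ <;> subst h
  · rfl
  · rw [pvBestM_cons_one, pvBestM_cons_one]

theorem pvStepB_plus (b : Int × Int) (L : Int) : pvStepB b (1, L) = (max b.1 L, b.2) := by
  unfold pvStepB
  simp only [show ((1:Int) == 1) = true from by decide, show ((1:Int) == -1) = false from by decide,
    Bool.true_and, Bool.false_and, Bool.false_eq_true, if_false]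
  split_ifs with h <;> simp at h <;> refine Prod.ext ?_ rfl <;> simp <;> omega

theorem pvStepB_minus (b : Int × Int) (L : Int) : pvStepB b (-1, L) = (b.1, max b.2 L) := by
  unfold pvStepB
  simp only [show ((-1:Int) == 1) = false from by decide, show ((-1:Int) == -1) = true from by decide,
    Bool.true_and, Bool.false_and, Bool.false_eq_true, if_false]
  split_ifs with h <;> simp at h <;> refine Prod.ext rfl ?_ <;> simp <;> omega

theorem pvLemB (n : Nat) : ∀ (signs : List Int), signs.length ≤ n →
    (∀ x ∈ signs, x = 1 ∨ x = -1) → ∀ P M : Int, 0 ≤ P → 0 ≤ M →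
    (pvRuns signs).foldl pvStepB (P, M)
      = (max P (pvBestP 0 signs), max M (pvBestM 0 signs)) := by
  induction n with
  | zero =>
    intro signs hlen _ P M hP hM
    have : signs = [] := List.eq_nil_of_length_eq_zero (Nat.le_zero.1 hlen)
    subst this
    simp [pvRuns, pvBestP, pvBestM]
    omega
  | succ n ih =>
    intro signs hlen hpm P M hP hM
    match signs with
    | [] => simp [pvRuns, pvBestP, pvBestM]; omega
    | s :: rest =>
      have hs := hpm s (by simp)
      rcases hs with hs1 | hs1
      · subst hs1
        have hsplit := (List.takeWhile_append_dropWhile (p := fun x => x == (1:Int)) (l := rest)).symm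
        have htw1 : ∀ x ∈ rest.takeWhile (fun x => x == (1:Int)), x = (1:Int) := by
          intro x hx; simpa using List.mem_takeWhile_imp hx
        have hdwsub : ∀ x ∈ rest.dropWhile (fun x => x == (1:Int)), x = 1 ∨ x = -1 := by
          intro x hx
          exact hpm x (List.mem_cons_of_mem _ (by rw [hsplit]; exact List.mem_append_right _ hx))
        have hdwlen : (rest.dropWhile (fun x => x == (1:Int))).length ≤ n := by
          have := List.length_dropWhile_le (p := fun x => x == (1:Int)) (l := rest)
          simp only [List.length_cons] at hlen
          omega
        have hdwhead : rest.dropWhile (fun x => x == (1:Int)) = [] ∨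
            ∃ t', rest.dropWhile (fun x => x == (1:Int)) = -1 :: t' := by
          match hh : rest.dropWhile (fun x => x == (1:Int)) with
          | [] => exact Or.inl rfl
          | d :: t' =>
            refine Or.inr ⟨t', ?_⟩
            have h3 := List.head?_dropWhile_not (p := fun x => x == (1:Int)) (l := rest)
            rw [hh] at h3
            have hd : (d == (1:Int)) = false := by simpa using h3
            have hdpm : d = 1 ∨ d = -1 := hdwsub d (by rw [hh]; simp)
            rcases hdpm with h2 | h2
            · subst h2; simp at hd
            · subst h2; rfl
        rw [pvRuns, List.foldl_cons]
        rw [pvStepB_plus]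
        rw [ih _ hdwlen hdwsub _ _ (by omega) hM]
        have e1 : pvBestP 0 (1 :: rest)
            = max (1 + ((rest.takeWhile (fun x => x == (1:Int))).length : Int))
                (pvBestP 0 (rest.dropWhile (fun x => x == (1:Int)))) := by
          conv_lhs => rw [hsplit]
          rw [← List.cons_append]
          rw [pvBestP_run_one _ htw1 0 _, pvBestP_reset _ hdwhead _]
          norm_num
        have e2 : pvBestM 0 (1 :: rest)
            = pvBestM 0 (rest.dropWhile (fun x => x == (1:Int))) := by
          conv_lhs => rw [hsplit]
          rw [← List.cons_append]
          exact pvBestM_run_one _ htw1 0 _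
        rw [e1, e2, max_assoc]
      · subst hs1
        have hsplit := (List.takeWhile_append_dropWhile (p := fun x => x == (-1:Int)) (l := rest)).symm
        have htw1 : ∀ x ∈ rest.takeWhile (fun x => x == (-1:Int)), x = (-1:Int) := by
          intro x hx; simpa using List.mem_takeWhile_imp hx
        have hdwsub : ∀ x ∈ rest.dropWhile (fun x => x == (-1:Int)), x = 1 ∨ x = -1 := by
          intro x hx
          exact hpm x (List.mem_cons_of_mem _ (by rw [hsplit]; exact List.mem_append_right _ hx))
        have hdwlen : (rest.dropWhile (fun x => x == (-1:Int))).length ≤ n := by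
          have := List.length_dropWhile_le (p := fun x => x == (-1:Int)) (l := rest)
          simp only [List.length_cons] at hlen
          omega
        have hdwhead : rest.dropWhile (fun x => x == (-1:Int)) = [] ∨
            ∃ t', rest.dropWhile (fun x => x == (-1:Int)) = 1 :: t' := by
          match hh : rest.dropWhile (fun x => x == (-1:Int)) with
          | [] => exact Or.inl rfl
          | d :: t' =>
            refine Or.inr ⟨t', ?_⟩
            have h3 := List.head?_dropWhile_not (p := fun x => x == (-1:Int)) (l := rest)
            rw [hh] at h3
            have hd : (d == (-1:Int)) = false := by simpa using h3
            have hdpm : d = 1 ∨ d = -1 := hdwsub d (by rw [hh]; simp)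
            rcases hdpm with h2 | h2
            · subst h2; rfl
            · subst h2; simp at hd
        rw [pvRuns, List.foldl_cons]
        rw [pvStepB_minus]
        rw [ih _ hdwlen hdwsub _ _ hP (by omega)]
        have e1 : pvBestM 0 (-1 :: rest)
            = max (1 + ((rest.takeWhile (fun x => x == (-1:Int))).length : Int))
                (pvBestM 0 (rest.dropWhile (fun x => x == (-1:Int)))) := by
          conv_lhs => rw [hsplit]
          rw [← List.cons_append]
          rw [pvBestM_run_neg _ htw1 0 _, pvBestM_reset _ hdwhead _]
          norm_num
        have e2 : pvBestP 0 (-1 :: rest)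
            = pvBestP 0 (rest.dropWhile (fun x => x == (-1:Int))) := by
          conv_lhs => rw [hsplit]
          rw [← List.cons_append]
          exact pvBestP_run_neg _ htw1 0 _
        rw [e1, e2, max_assoc]

-- ===== VERDICT (by name: the statement is the Claim_ definition above) =====
theorem additional_statistics_spec : Claim_equal_additional_statistics := by
  intro positions _ _
  unfold Spec_additional_statistics additional_statistics additional_statistics_alt
  have hA1 := pvLemA1 positions 0 0 0 0 le_rfl le_rfl
  have hA2 := pvLemA2 positions 0 0 0 0 le_rfl le_rfl
  have hB := pvLemB (positions.filterMap pvSign?).length (positions.filterMap pvSign?)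
      le_rfl (pvSign_pm positions) 0 0 le_rfl le_rfl
  simp only [hA1, hA2, hB]
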